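-- pv_equiv track=rewrite | github.com/cisco-ai-defense/defenseclaw | cli/defenseclaw/audit_actions.py | is_known_action_prefix
-- ===== SOURCE A (Python) =====
-- from typing import Final
--
-- _CODEX_NOTIFY_PREFIX: Final[str] = "codex.notify."
--
-- _CODEX_NOTIFY_SUFFIX_MAX_LEN: Final[int] = 64
--
-- def is_known_action_prefix(s: str) -> bool:
--     """Return True when ``s`` is a curated dynamic-suffix action.
--
--     Today this only covers ``codex.notify.<sanitized-type>``: the
--     codex notify handler builds the action key from the inbound
--     payload's ``type`` field after running it through a strict
--     ``[a-z0-9._-]{1,64}`` allow-list. Mirrors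
--     ``IsKnownActionPrefix`` in ``internal/audit/actions.go`` so
--     the Python audit-row validators agree with the Go writer.
--     """
--     if not s.startswith(_CODEX_NOTIFY_PREFIX):
--         return False
--     suffix = s[len(_CODEX_NOTIFY_PREFIX):]
--     if not suffix or len(suffix) > _CODEX_NOTIFY_SUFFIX_MAX_LEN:
--         return False
--     return all(
--         ('a' <= c <= 'z') or ('0' <= c <= '9') or c in ('-', '_', '.')
--         for c in suffix
--     )
-- ===== SOURCE B (Python) =====
-- import re
--
-- _CODEX_NOTIFY_RE = re.compile(r"codex\.notify\.[a-z0-9._-]{1,64}\Z")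
--
-- def is_known_action_prefix(s: str) -> bool:
--     return _CODEX_NOTIFY_RE.match(s) is not None
-- ===== Notes on version B (the rewrite author's own statement) =====
-- stated objective: idiomatic
-- what changed: Replaced the manual prefix check, suffix slice, length test and all() character loop with a single precompiled anchored regex fullmatch that encodes prefix, allow-list and the 1..64 bound in one automaton.
import Mathlib
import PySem

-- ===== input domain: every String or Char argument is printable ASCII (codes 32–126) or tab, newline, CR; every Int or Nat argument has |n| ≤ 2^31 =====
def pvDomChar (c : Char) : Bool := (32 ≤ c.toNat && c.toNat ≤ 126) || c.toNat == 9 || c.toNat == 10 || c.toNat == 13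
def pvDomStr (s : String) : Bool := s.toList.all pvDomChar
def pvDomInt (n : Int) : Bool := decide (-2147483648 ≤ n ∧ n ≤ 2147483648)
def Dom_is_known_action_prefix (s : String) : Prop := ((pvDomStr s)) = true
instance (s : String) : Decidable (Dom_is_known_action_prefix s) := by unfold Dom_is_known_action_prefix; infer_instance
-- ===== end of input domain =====

-- B replaces A's prefix check + slice + length test + all() loop by a single anchored
-- regex fullmatch (ported as the equivalent one-pass literal/class matcher); objective: idiomatic.

-- ===== PORT A =====
-- A's character allow-list test, as written in the comprehension
def pvAllowedA (c : Char) : Bool :=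
  ('a' ≤ c && c ≤ 'z') || ('0' ≤ c && c ≤ '9') || (c = '-' || c = '_' || c = '.')

def is_known_action_prefix (s : String) : Bool :=
  if ¬ (PySem.Str.startswith s "codex.notify.") then false
  else
    -- suffix = s[len("codex.notify."):]
    let suffix := PySem.List.slice s.toList (some (13 : Int)) none
    if suffix.isEmpty || suffix.length > 64 then false
    else suffix.all pvAllowedA

-- ===== PORT B =====
-- the regex character class [a-z0-9._-]
def pvAllowedB (c : Char) : Bool :=
  ('a' ≤ c && c ≤ 'z') || ('0' ≤ c && c ≤ '9') || c = '.' || c = '_' || c = '-'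

-- consume a literal regex part; none = no match
def pvConsumeLit : List Char → List Char → Option (List Char)
  | [], rest => some rest
  | _ :: _, [] => none
  | l :: ls, c :: cs => if c = l then pvConsumeLit ls cs else none

-- [a-z0-9._-]{1,64}\Z : consume class chars to the end, counting (n = chars matched so far)
def pvMatchClass : List Char → Nat → Bool
  | [], n => decide (1 ≤ n)
  | c :: cs, n => pvAllowedB c && decide (n < 64) && pvMatchClass cs (n + 1)

def is_known_action_prefix_alt (s : String) : Bool :=
  match pvConsumeLit "codex.notify.".toList s.toList with
  | none => false
  | some rest => pvMatchClass rest 0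

-- ===== PRECONDITION & SPEC =====
def Spec_is_known_action_prefix (s : String) (out : Bool) : Prop := out = is_known_action_prefix_alt s
instance (s : String) (out : Bool) : Decidable (Spec_is_known_action_prefix s out) := by unfold Spec_is_known_action_prefix; infer_instance

-- ===== CLAIM (what is proved, stated in full; the proofs are below) =====
def Claim_equal_is_known_action_prefix : Prop := ∀ (s : String), Dom_is_known_action_prefix s → Spec_is_known_action_prefix s (is_known_action_prefix s)

-- ===== LEMMAS AND PROOFS =====

theorem pvAllowed_eq (c : Char) : pvAllowedA c = pvAllowedB c := by
  unfold pvAllowedA pvAllowedB; cases hc1 : decide ('a' ≤ c) <;> cases hc2 : decide (c ≤ 'z') <;> cases hc3 : decide ('0' ≤ c) <;> cases hc4 : decide (c ≤ '9') <;> cases hc5 : c == '-' <;> cases hc6 : c == '_' <;> cases hc7 : c == '.' <;> simp_all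

theorem pvConsumeLit_some (p xs r : List Char) :
    pvConsumeLit p xs = some r ↔ xs = p ++ r := by
  induction p generalizing xs with
  | nil => cases xs <;> simp [pvConsumeLit]
  | cons l ls ih =>
    cases xs with
    | nil => simp [pvConsumeLit]
    | cons c cs =>
      by_cases h : c = l
      · simp [pvConsumeLit, h, ih]
      · simp only [pvConsumeLit, if_neg h]
        simp
        intro hc; exact absurd hc h

theorem pvMatchClass_eq (l : List Char) (n : Nat) (hn : n ≤ 64) :
    pvMatchClass l n =
      (decide (1 ≤ n + l.length) && decide (n + l.length ≤ 64) && l.all pvAllowedB) := by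
  induction l generalizing n with
  | nil => simp [pvMatchClass]; omega
  | cons c cs ih =>
    by_cases h : n < 64
    · have e : n + 1 + cs.length = n + (cs.length + 1) := by omega
      have one : 1 ≤ n + (cs.length + 1) := by omega
      cases hc : pvAllowedB c <;> cases hall : cs.all pvAllowedB <;>
        simp [pvMatchClass, ih (n + 1) (by omega), e, h, one, hc, hall]
    · have hn64 : n = 64 := by omega
      have hf : ¬ (64 + (cs.length + 1) ≤ 64) := by omega
      simp [pvMatchClass, hn64, hf]

theorem is_known_action_prefix_spec : Claim_equal_is_known_action_prefix := by
  intro s _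
  unfold Spec_is_known_action_prefix is_known_action_prefix is_known_action_prefix_alt
  by_cases hp : ("codex.notify.".toList) <+: s.toList
  · obtain ⟨r, hr⟩ := hp
    have hs : PySem.Str.startswith s "codex.notify." = true := by
      simp [PySem.Str.startswith_eq, PySem.Chars.startswith_iff]
      exact ⟨r, hr⟩
    have hc : pvConsumeLit "codex.notify.".toList s.toList = some r :=
      (pvConsumeLit_some _ _ _).mpr hr.symm
    have hslice : PySem.List.slice s.toList (some (13 : Int)) none = r := by
      rw [← hr]
      rw [PySem.List.slice_from _ (by norm_num : (0:Int) ≤ 13)]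
      simp
    have hA : pvAllowedA = pvAllowedB := funext pvAllowed_eq
    rw [hc, hs, hslice]
    show (if ¬ true = true then false
          else if (r.isEmpty || decide (r.length > 64)) = true then false
          else r.all pvAllowedA) = pvMatchClass r 0
    rw [pvMatchClass_eq r 0 (Nat.zero_le 64)]
    by_cases h1 : r = []
    · simp [h1]
    · have l1 : 1 ≤ r.length := Nat.one_le_iff_ne_zero.mpr (by simpa using h1)
      by_cases h2 : r.length > 64
      · simp [h2]
      · have l2 : r.length ≤ 64 := by omega
        simp [List.isEmpty_iff, h1, h2, hA, l1, l2]
  · have hs : PySem.Str.startswith s "codex.notify." = false := by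
      simp [PySem.Str.startswith_eq]
      rw [← Bool.not_eq_true, PySem.Chars.startswith_iff]
      exact hp
    have hc : pvConsumeLit "codex.notify.".toList s.toList = none := by
      cases h : pvConsumeLit "codex.notify.".toList s.toList with
      | none => rfl
      | some r => exact absurd ⟨r, ((pvConsumeLit_some _ _ _).mp h).symm⟩ hp
    rw [hc, hs]; simp
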